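-- pv_equiv track=rewrite | github.com/Lorenzo3m/University-Projects | first_semester/Project_5.py | is_half_anagram
-- ===== SOURCE A (Python) =====
-- def is_half_anagram(str1, str2):
--     str11 = sorted(str1)
--     str22 = sorted(str2)
--     if len(str2) - len(str1) > 1 or len(str2) - len(str1) < 0:
--         return False
--
--     if len(str11) == 0 and len(str22) == 1:
--         return True
--
--     if not str1 and not str2:
--         return True
--
--     if str11[0] == str22[0]:
--         return is_half_anagram(str11[1:], str22[1:])
--
--     if str11[0] != str22[0]:
--         return is_half_anagram(str11, str22[1:])
-- ===== SOURCE B (Python) =====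
-- def is_half_anagram(str1, str2):
--     diff = len(str2) - len(str1)
--     if diff not in (0, 1):
--         return False
--     counts = {}
--     for c in str2:
--         counts[c] = counts.get(c, 0) + 1
--     for c in str1:
--         n = counts.get(c, 0)
--         if n == 0:
--             return False
--         counts[c] = n - 1
--     return True
-- ===== Notes on version B (the rewrite author's own statement) =====
-- stated objective: faster
-- what changed: A re-sorts both remaining lists at every step of a recursive sorted-subsequence scan; B never sorts: it checks the length-difference guard once and then verifies multiset containment with a single character-count dictionary built in one pass over str2 and consumed in one pass over str1.
import Mathlib
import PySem

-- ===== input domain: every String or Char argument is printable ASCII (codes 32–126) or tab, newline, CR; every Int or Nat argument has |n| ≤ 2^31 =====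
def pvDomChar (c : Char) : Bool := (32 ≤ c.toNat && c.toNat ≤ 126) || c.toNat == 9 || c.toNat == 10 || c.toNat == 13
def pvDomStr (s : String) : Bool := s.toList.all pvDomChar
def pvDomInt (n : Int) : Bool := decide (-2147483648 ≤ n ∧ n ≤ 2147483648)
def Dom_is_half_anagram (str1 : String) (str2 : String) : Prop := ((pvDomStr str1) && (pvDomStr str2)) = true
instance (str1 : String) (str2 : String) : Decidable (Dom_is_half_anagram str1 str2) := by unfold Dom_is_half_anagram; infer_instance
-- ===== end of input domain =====

-- B replaces A's repeated-sorting recursion (O(n^2 log n)) by a single character-count dictionary pass (the length-diff guard plus a Counter-style containment check); objective: faster.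


-- ===== PORT A =====
-- A recurses on lists (after the first call both arguments are lists of chars); the
-- wrapper converts the two strings. Each call re-sorts its arguments, as the Python does.
-- The '| _, _ => false' match arm is unreachable (the guards above it ensure both sorted
-- lists are nonempty there, as in the Python, which never indexes an empty list).
def pyHalfRec (l1 l2 : List Char) : Bool :=
  let s1 := PySem.List.sorted l1 (fun x => x) false
  let s2 := PySem.List.sorted l2 (fun x => x) false
  if (l2.length : Int) - (l1.length : Int) > 1 ∨ (l2.length : Int) - (l1.length : Int) < 0 then
    false
  else if s1.length = 0 ∧ s2.length = 1 then
    true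
  else if l1 = [] ∧ l2 = [] then
    true
  else
    match _h1 : s1, _h2 : s2 with
    | c1 :: t1, c2 :: t2 =>
        if c1 = c2 then pyHalfRec t1 t2 else pyHalfRec (c1 :: t1) t2
    | _, _ => false
termination_by l2.length
decreasing_by
  all_goals
    have hlen : s2.length = l2.length := PySem.List.length_sorted l2 (fun x => x) false
    simp [_h2] at hlen
    omega

def is_half_anagram (str1 : String) (str2 : String) : Bool :=
  pyHalfRec str1.toList str2.toList

-- ===== PORT B =====
-- counts[c] = counts.get(c, 0) + 1  over str2
def pvCountChars (l : List Char) : PySem.Dict Char Int :=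
  l.foldl (fun d c => d.insert c (d.getD c 0 + 1)) PySem.Dict.empty

-- the second loop of Source B, with its early 'return False'
def pvConsume (d : PySem.Dict Char Int) (l : List Char) : Bool :=
  match l with
  | [] => true
  | c :: t =>
      let n := d.getD c 0
      if n = 0 then false else pvConsume (d.insert c (n - 1)) t

def is_half_anagram_alt (str1 : String) (str2 : String) : Bool :=
  let l1 := str1.toList
  let l2 := str2.toList
  let diff : Int := (l2.length : Int) - (l1.length : Int)
  if diff ≠ 0 ∧ diff ≠ 1 then false
  else pvConsume (pvCountChars l2) l1

-- ===== PRECONDITION & SPEC =====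
def Spec_is_half_anagram (str1 : String) (str2 : String) (out : Bool) : Prop := out = is_half_anagram_alt str1 str2
instance (str1 : String) (str2 : String) (out : Bool) : Decidable (Spec_is_half_anagram str1 str2 out) := by unfold Spec_is_half_anagram; infer_instance

-- ===== CLAIM (what is proved, stated in full; the proofs are below) =====
def Claim_equal_is_half_anagram : Prop := ∀ (str1 : String) (str2 : String), Dom_is_half_anagram str1 str2 → Spec_is_half_anagram str1 str2 (is_half_anagram str1 str2)

-- ===== LEMMAS AND PROOFS =====

-- counts built from l2 are exactly the character counts
theorem pvCountChars_getD (l : List Char) (c : Char) :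
    (pvCountChars l).getD c 0 = (l.count c : Int) := by
  simp [pvCountChars, PySem.Dict.getD_foldl_insert_add_one, PySem.Dict.getD_empty]

-- the consume loop succeeds iff every character of l fits in the remaining (nonnegative) budget d
theorem pvConsume_iff (l : List Char) : ∀ (d : PySem.Dict Char Int),
    (∀ x : Char, 0 ≤ d.getD x 0) →
    (pvConsume d l = true ↔ ∀ c : Char, (l.count c : Int) ≤ d.getD c 0) := by
  induction l with
  | nil =>
    intro d h
    simp only [pvConsume, List.count_nil, Int.natCast_zero, true_iff]
    intro c; exact h c
  | cons c t ih =>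
    intro d h
    rw [pvConsume]
    by_cases hn : d.getD c 0 = 0
    · rw [if_pos hn]
      constructor
      · intro hf; cases hf
      · intro H
        exfalso
        have := H c
        rw [List.count_cons] at this
        simp only [BEq.rfl, if_pos] at this
        push_cast at this
        omega
    · rw [if_neg hn]
      have h' : ∀ x : Char, 0 ≤ (d.insert c (d.getD c 0 - 1)).getD x 0 := by
        intro x
        rw [PySem.Dict.getD_insert]
        split_ifs with hx
        · have := h c; omega
        · exact h x
      rw [ih _ h']
      have key : ∀ x : Char,
          ((t.count x : Int) ≤ (d.insert c (d.getD c 0 - 1)).getD x 0) ↔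
          (((c :: t).count x : Int) ≤ d.getD x 0) := by
        intro x
        rw [PySem.Dict.getD_insert, List.count_cons]
        by_cases hx : x = c
        · subst hx
          simp only [BEq.rfl]
          push_cast
          omega
        · have hcx : (c == x) = false := by simp [Ne.symm hx]
          rw [if_neg hx, hcx]
          simp
      exact forall_congr' key

-- characterisation of A's recursion: length guard plus multiset containment
theorem pyHalfRec_iff_aux : ∀ (n : Nat), ∀ (l1 l2 : List Char), l2.length ≤ n →
    (pyHalfRec l1 l2 = true ↔
      (((l2.length : Int) - (l1.length : Int) = 0 ∨ (l2.length : Int) - (l1.length : Int) = 1) ∧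
       ∀ c : Char, l1.count c ≤ l2.count c)) := by
  intro n
  induction n using Nat.strong_induction_on with
  | _ n ih =>
  intro l1 l2 hn
  have hp1 := PySem.List.sorted_perm l1 (fun x => x) false
  have hp2 := PySem.List.sorted_perm l2 (fun x => x) false
  have hlen1 : (PySem.List.sorted l1 (fun x => x) false).length = l1.length := hp1.length_eq
  have hlen2 : (PySem.List.sorted l2 (fun x => x) false).length = l2.length := hp2.length_eq
  rw [pyHalfRec]
  split_ifs with hg1 hg2 hg3
  · -- length guard fails: both sides false
    constructor
    · intro hf; cases hf
    · rintro ⟨hd, -⟩; exfalso; omega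
  · -- len str1 = 0 and len str2 = 1
    obtain ⟨h10, h21⟩ := hg2
    have hl1 : l1 = [] := List.eq_nil_of_length_eq_zero (by omega)
    subst hl1
    simp only [true_iff]
    refine ⟨by right; simp; omega, fun c => by simp⟩
  · -- both empty
    obtain ⟨h1e, h2e⟩ := hg3
    subst h1e; subst h2e
    simp
  · -- recursive branch
    have hs1ne : PySem.List.sorted l1 (fun x => x) false ≠ [] := by
      intro he
      have hl1 : l1 = [] := (PySem.List.sorted_eq_nil_iff ..).mp he
      have h10 : l1.length = 0 := by rw [hl1]; rfl
      have hcase : l2.length = 0 ∨ l2.length = 1 := by omega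
      rcases hcase with h | h
      · exact hg3 ⟨hl1, List.eq_nil_of_length_eq_zero h⟩
      · exact hg2 ⟨by rw [he]; rfl, by rw [hlen2]; exact h⟩
    have hs2ne : PySem.List.sorted l2 (fun x => x) false ≠ [] := by
      intro he
      have hl2 : l2 = [] := (PySem.List.sorted_eq_nil_iff ..).mp he
      have h20 : l2.length = 0 := by rw [hl2]; rfl
      have h10 : l1.length = 0 := by omega
      exact hg3 ⟨List.eq_nil_of_length_eq_zero h10, hl2⟩
    split
    case _ c1 t1 c2 t2 e1 e2 =>
      have hpw1 := PySem.List.sorted_pairwise l1 (fun x => x)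
      have hpw2 := PySem.List.sorted_pairwise l2 (fun x => x)
      rw [e1] at hpw1 hlen1 hp1
      rw [e2] at hpw2 hlen2 hp2
      have hmin1 : ∀ x ∈ t1, c1 ≤ x := (List.pairwise_cons.mp hpw1).1
      have hmin2 : ∀ x ∈ t2, c2 ≤ x := (List.pairwise_cons.mp hpw2).1
      have hc1 : ∀ c : Char, l1.count c = (c1 :: t1).count c := fun c => (hp1.count_eq c).symm
      have hc2 : ∀ c : Char, l2.count c = (c2 :: t2).count c := fun c => (hp2.count_eq c).symm
      simp only [List.length_cons] at hlen1 hlen2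
      have hlt2 : t2.length < n := by omega
      by_cases hcc : c1 = c2
      · rw [if_pos hcc]
        subst hcc
        rw [ih t2.length hlt2 t1 t2 le_rfl]
        have hkey : ∀ c : Char, (l1.count c ≤ l2.count c) ↔ (t1.count c ≤ t2.count c) := by
          intro c
          rw [hc1, hc2, List.count_cons, List.count_cons]
          omega
        constructor
        · rintro ⟨hd, hcnt⟩
          exact ⟨by omega, fun c => (hkey c).mpr (hcnt c)⟩
        · rintro ⟨hd, hcnt⟩
          exact ⟨by omega, fun c => (hkey c).mp (hcnt c)⟩
      · rw [if_neg hcc]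
        rw [ih t2.length hlt2 (c1 :: t1) t2 le_rfl]
        rcases lt_or_gt_of_ne hcc with hlt | hgt
        · -- c1 < c2 : c1 occurs in str1 but nowhere in str2; both sides false
          have hnot2 : c1 ∉ t2 := fun hm => absurd (hmin2 c1 hm) (not_le.mpr hlt)
          have hnot2' : c1 ∉ c2 :: t2 := by
            intro hm
            rcases List.mem_cons.mp hm with h | h
            · exact hcc h
            · exact hnot2 h
          have hcnt1pos : 0 < (c1 :: t1).count c1 := List.count_pos_iff.mpr (List.mem_cons_self ..)
          constructor
          · rintro ⟨-, hcnt⟩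
            exfalso
            have hh := hcnt c1
            rw [List.count_eq_zero.mpr hnot2] at hh
            omega
          · rintro ⟨-, hcnt⟩
            exfalso
            have hh := hcnt c1
            rw [hc1, hc2, List.count_eq_zero.mpr hnot2'] at hh
            omega
        · -- c2 < c1 : c2 occurs nowhere in str1; dropping it from str2 is harmless
          have hnot1 : c2 ∉ c1 :: t1 := by
            intro hm
            rcases List.mem_cons.mp hm with h | h
            · exact hcc h.symm
            · exact absurd (hmin1 c2 h) (not_le.mpr hgt)
          have hz1 : (c1 :: t1).count c2 = 0 := List.count_eq_zero.mpr hnot1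
          have hc2' : ∀ c : Char, l2.count c = t2.count c + if (c2 == c) = true then 1 else 0 :=
            fun c => by rw [hc2, List.count_cons]
          have hPQ : (∀ c : Char, l1.count c ≤ l2.count c) ↔
              (∀ c : Char, (c1 :: t1).count c ≤ t2.count c) := by
            constructor
            · intro H c
              have hh := H c
              rw [hc1, hc2'] at hh
              by_cases hcz : c = c2
              · subst hcz
                rw [hz1]
                exact Nat.zero_le _
              · have hb : (c2 == c) = false := by simp [Ne.symm hcz]
                rw [hb] at hh
                simpa using hh
            · intro H c
              rw [hc1, hc2']
              exact le_trans (H c) (Nat.le_add_right _ _)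
          simp only [List.length_cons]
          constructor
          · rintro ⟨hd, hQ⟩
            refine ⟨by push_cast at hd ⊢; omega, hPQ.mpr hQ⟩
          · rintro ⟨hd, hP⟩
            have hQ := hPQ.mp hP
            have hd1 : (l2.length : Int) - (l1.length : Int) = 1 := by
              by_contra hne
              have hsub : (c1 :: t1).Subperm t2 :=
                List.subperm_ext_iff.mpr (fun x _ => hQ x)
              have hle := hsub.length_le
              simp only [List.length_cons] at hle
              omega
            exact ⟨by push_cast; omega, hQ⟩
    case _ hno =>
      exfalso
      obtain ⟨c1, t1, e1⟩ := List.exists_cons_of_ne_nil hs1ne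
      obtain ⟨c2, t2, e2⟩ := List.exists_cons_of_ne_nil hs2ne
      exact hno c1 t1 c2 t2 e1 e2

theorem pyHalfRec_iff (l1 l2 : List Char) :
    (pyHalfRec l1 l2 = true ↔
      (((l2.length : Int) - (l1.length : Int) = 0 ∨ (l2.length : Int) - (l1.length : Int) = 1) ∧
       ∀ c : Char, l1.count c ≤ l2.count c)) :=
  pyHalfRec_iff_aux l2.length l1 l2 le_rfl

-- ===== VERDICT (by name: the statement is the Claim_ definition above) =====
theorem is_half_anagram_spec : Claim_equal_is_half_anagram := by
  intro str1 str2 _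
  unfold Spec_is_half_anagram is_half_anagram is_half_anagram_alt
  rw [Bool.eq_iff_iff, pyHalfRec_iff]
  set l1 := str1.toList
  set l2 := str2.toList
  by_cases hg : ((l2.length : Int) - (l1.length : Int) ≠ 0 ∧ (l2.length : Int) - (l1.length : Int) ≠ 1)
  · rw [if_pos hg]
    constructor
    · rintro ⟨hd, -⟩; exact absurd hd (by omega)
    · intro hf; cases hf
  · rw [if_neg hg]
    have hnn : ∀ x : Char, 0 ≤ (pvCountChars l2).getD x 0 := by
      intro x; rw [pvCountChars_getD]; positivity
    rw [pvConsume_iff l1 _ hnn]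
    constructor
    · rintro ⟨-, hcnt⟩ c
      rw [pvCountChars_getD]
      exact_mod_cast hcnt c
    · intro H
      refine ⟨by omega, fun c => ?_⟩
      have := H c
      rw [pvCountChars_getD] at this
      exact_mod_cast this
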